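-- pv_equiv track=rewrite | github.com/iammetin/whispermac | workflows.py | split_by_triggers
-- ===== SOURCE A (Python) =====
-- def split_by_triggers(text: str, workflows: list) -> list:
--     """
--     Teilt den transkribierten Text an Trigger-Phrasen auf.
--
--     Rückgabe: Liste von (text_segment, workflow_oder_None)
--     → text_segment wird eingefügt, danach wird die Aktion des Workflows ausgeführt.
--
--     Beispiel:
--         "Hallo Welt nächste Zeile Wie geht es dir"
--         + Workflow {"trigger": "nächste Zeile", "action": "enter"}
--         →  [("Hallo Welt", {…enter…}), ("Wie geht es dir", None)]
--     """
--     if not workflows: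
--         return [(text, None)]
--
--     # Längste Trigger zuerst (verhindert Teilersetzungen)
--     active = [w for w in workflows if w.get("trigger", "").strip()]
--     active.sort(key=lambda w: len(w["trigger"]), reverse=True)
--
--     result   = []
--     remaining = text
--
--     while remaining:
--         best_pos = len(remaining)
--         best_wf  = None
--
--         for wf in active:
--             pos = remaining.lower().find(wf["trigger"].lower())
--             if 0 <= pos < best_pos:
--                 best_pos = pos
--                 best_wf  = wf
--
--         if best_wf is None:
--             result.append((remaining.strip(), None))
--             break
--
--         # Satzzeichen entfernen, die Whisper rund um den Trigger einfügt
--         before = remaining[:best_pos].strip().rstrip(" \t,.")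
--         result.append((before, best_wf))
--         remaining = remaining[best_pos + len(best_wf["trigger"]):]
--         remaining = remaining.lstrip(" \t,.")
--
--     return result
-- ===== SOURCE B (Python) =====
-- def split_by_triggers(text: str, workflows: list) -> list:
--     """Position-major re-implementation: lowercase each remaining chunk once and
--     scan it left-to-right, testing all triggers (longest-first) with startswith
--     at each index, instead of running .find for every trigger per chunk."""
--     if not workflows:
--         return [(text, None)]
--
--     active = [w for w in workflows if w.get("trigger", "").strip()]
--     active.sort(key=lambda w: len(w["trigger"]), reverse=True)
--     trigs = [(w["trigger"].lower(), w) for w in active]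
--
--     CHOP = " \t,."
--     result = []
--     remaining = text
--
--     while remaining:
--         low = remaining.lower()
--         hit = None
--         for i in range(len(low)):
--             for t, w in trigs:
--                 if low.startswith(t, i):
--                     hit = (i, t, w)
--                     break
--             if hit is not None:
--                 break
--         if hit is None:
--             result.append((remaining.strip(), None))
--             break
--         i, t, w = hit
--         result.append((remaining[:i].strip().rstrip(CHOP), w))
--         remaining = remaining[i + len(t):].lstrip(CHOP)
--
--     return result
-- ===== Notes on version B (the rewrite author's own statement) =====
-- stated objective: alternative
-- what changed: Replaces the per-trigger .find-and-running-minimum pass (which lowercases the whole remaining text once per trigger per chunk) by a single position-major scan: lowercase each remaining chunk once, walk it left-to-right and test the (longest-first) triggers with startswith at each index, taking the first hit.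
import Mathlib
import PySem

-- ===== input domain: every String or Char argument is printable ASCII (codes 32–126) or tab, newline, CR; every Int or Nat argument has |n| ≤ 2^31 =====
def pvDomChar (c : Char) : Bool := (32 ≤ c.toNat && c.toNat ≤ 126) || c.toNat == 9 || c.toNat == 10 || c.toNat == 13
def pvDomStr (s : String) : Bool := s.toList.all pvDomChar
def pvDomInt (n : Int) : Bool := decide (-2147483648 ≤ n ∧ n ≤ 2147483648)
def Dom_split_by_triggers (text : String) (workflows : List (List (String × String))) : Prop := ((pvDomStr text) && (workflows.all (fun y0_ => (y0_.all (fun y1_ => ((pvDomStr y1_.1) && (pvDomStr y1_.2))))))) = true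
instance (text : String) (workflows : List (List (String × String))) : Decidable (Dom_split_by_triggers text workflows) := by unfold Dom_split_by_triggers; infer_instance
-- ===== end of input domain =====

-- B replaces A's per-trigger find-and-running-minimum pass by a single left-to-right
-- position scan of the (once-)lowercased chunk, testing the triggers with a prefix
-- match at each index and taking the first hit (objective: alternative algorithm).

-- ===== PORT A =====
-- shared with port B: both Pythons do w.get("trigger", ""), the same filter+sort,
-- and the same .rstrip(" \t,.") / .lstrip(" \t,.") (ported by hand: Python's
-- str.rstrip/lstrip with a char set drops chars of the set from that end; exact here).
def pvTrig (w : List (String × String)) : String := PySem.Dict.getD ⟨w⟩ "trigger" ""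

def pvChopChars : List Char := [' ', '\t', ',', '.']

def pvRstripChop (cs : List Char) : List Char := (cs.reverse.dropWhile (fun c => c ∈ pvChopChars)).reverse

def pvLstripChop (cs : List Char) : List Char := cs.dropWhile (fun c => c ∈ pvChopChars)

-- active = [w for w in workflows if w.get("trigger","").strip()]; sort by len, longest first
def pvActive (workflows : List (List (String × String))) : List (List (String × String)) :=
  PySem.List.sorted
    (workflows.filter (fun w => decide (PySem.Str.strip (pvTrig w) ≠ "")))
    (fun w => PySem.Str.len (pvTrig w)) true

-- the inner 'for wf in active' of A: fold tracking (best_pos, best_wf)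
def pvBestA (active : List (List (String × String))) (remaining : List Char) :
    Int × Option (List (String × String)) :=
  active.foldl
    (fun best wf =>
      let pos := PySem.Chars.find (PySem.Chars.lower remaining)
                    (PySem.Chars.lower (pvTrig wf).toList)
      if 0 ≤ pos ∧ pos < best.1 then (pos, some wf) else best)
    ((remaining.length : Int), none)

-- A's while loop; fuel = len(text)+1 makes it structural.
def pvLoopA (active : List (List (String × String))) :
    Nat → List Char → List (String × (Option (List (String × String))))
  | 0, _ => []
  | fuel+1, remaining =>
    if remaining = [] then []
    else
      let best := pvBestA active remaining
      match best.2 with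
      | none => [(String.ofList (PySem.Chars.strip remaining), none)]
      | some wf =>
        (String.ofList (pvRstripChop (PySem.Chars.strip (PySem.List.slice remaining none (some best.1)))), some wf)
          :: pvLoopA active fuel
              (pvLstripChop (PySem.List.slice remaining (some (best.1 + PySem.Str.len (pvTrig wf))) none))

def split_by_triggers (text : String) (workflows : List (List (String × String))) : List (String × (Option (List (String × String)))) :=
  if workflows = [] then [(text, none)]
  else pvLoopA (pvActive workflows) (text.toList.length + 1) text.toList

-- ===== PORT B =====
-- inner 'for t, w in trigs: if low.startswith(t, i)' of Source B
def pvMatchAt (suff : List Char) :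
    List (List Char × List (String × String)) → Option (List Char × List (String × String))
  | [] => none
  | tw :: rest => if tw.1.isPrefixOf suff then some tw else pvMatchAt suff rest

-- outer 'for i in range(len(low))' of Source B: scan positions, stop at the first hit
def pvFirstHit (trigs : List (List Char × List (String × String))) :
    Nat → List Char → Option (Nat × (List Char × List (String × String)))
  | _, [] => none
  | i, c :: rest =>
    match pvMatchAt (c :: rest) trigs with
    | some tw => some (i, tw)
    | none => pvFirstHit trigs (i+1) rest

def pvLoopB (trigs : List (List Char × List (String × String))) :
    Nat → List Char → List (String × (Option (List (String × String))))
  | 0, _ => []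
  | fuel+1, remaining =>
    if remaining = [] then []
    else
      match pvFirstHit trigs 0 (PySem.Chars.lower remaining) with
      | none => [(String.ofList (PySem.Chars.strip remaining), none)]
      | some (i, tw) =>
        (String.ofList (pvRstripChop (PySem.Chars.strip (PySem.List.slice remaining none (some (i : Int))))), some tw.2)
          :: pvLoopB trigs fuel
              (pvLstripChop (PySem.List.slice remaining (some ((i + tw.1.length : Nat) : Int)) none))

def split_by_triggers_alt (text : String) (workflows : List (List (String × String))) : List (String × (Option (List (String × String)))) :=
  if workflows = [] then [(text, none)]
  else
    pvLoopB ((pvActive workflows).map (fun w => (PySem.Chars.lower (pvTrig w).toList, w)))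
      (text.toList.length + 1) text.toList

-- ===== PRECONDITION & SPEC =====
def Spec_split_by_triggers (text : String) (workflows : List (List (String × String))) (out : List (String × (Option (List (String × String))))) : Prop := out = split_by_triggers_alt text workflows
instance (text : String) (workflows : List (List (String × String))) (out : List (String × (Option (List (String × String))))) : Decidable (Spec_split_by_triggers text workflows out) := by unfold Spec_split_by_triggers; infer_instance

-- ===== CLAIM (what is proved, stated in full; the proofs are below) =====
def Claim_equal_split_by_triggers : Prop := ∀ (text : String) (workflows : List (List (String × String))), Dom_split_by_triggers text workflows → Spec_split_by_triggers text workflows (split_by_triggers text workflows)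

-- ===== LEMMAS AND PROOFS =====

-- abbreviation for A's fold step (proof-side only)
def pvFoldA (low : List Char) (trigs : List (List Char × List (String × String)))
    (init : Int × Option (List (String × String))) : Int × Option (List (String × String)) :=
  trigs.foldl
    (fun best tw =>
      let pos := PySem.Chars.find low tw.1
      if 0 ≤ pos ∧ pos < best.1 then (pos, some tw.2) else best)
    init

lemma pvMatchAt_eq_none_iff (suff : List Char) (trigs : List (List Char × List (String × String))) :
    pvMatchAt suff trigs = none ↔ ∀ tw ∈ trigs, ¬ (tw.1 <+: suff) := by
  induction trigs with
  | nil => simp [pvMatchAt]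
  | cons tw rest ih =>
    by_cases h : tw.1.isPrefixOf suff
    · simp [pvMatchAt, h, List.isPrefixOf_iff_prefix.mp h]
    · simp only [pvMatchAt, h, Bool.false_eq_true, ite_false, ih, List.mem_cons]
      constructor
      · rintro hr tw' (rfl | htw')
        · exact fun hp => h (List.isPrefixOf_iff_prefix.mpr hp)
        · exact hr tw' htw'
      · intro hall tw' htw'; exact hall tw' (Or.inr htw')

lemma pvMatchAt_mem (suff : List Char) (trigs : List (List Char × List (String × String)))
    (tw : List Char × List (String × String)) (h : pvMatchAt suff trigs = some tw) :
    tw ∈ trigs ∧ tw.1 <+: suff := by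
  induction trigs with
  | nil => simp [pvMatchAt] at h
  | cons tw' rest ih =>
    by_cases hp : tw'.1.isPrefixOf suff
    · simp only [pvMatchAt, hp, if_pos, Option.some.injEq] at h
      subst h
      exact ⟨List.mem_cons_self, List.isPrefixOf_iff_prefix.mp hp⟩
    · simp only [pvMatchAt, hp, Bool.false_eq_true, ite_false] at h
      obtain ⟨hm, hpre⟩ := ih h
      exact ⟨List.mem_cons_of_mem _ hm, hpre⟩

lemma pvFirstHit_none_spec (trigs : List (List Char × List (String × String))) :
    ∀ (suff : List Char) (i : Nat), pvFirstHit trigs i suff = none →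
      ∀ k < suff.length, pvMatchAt (suff.drop k) trigs = none := by
  intro suff
  induction suff with
  | nil => intro i _ k hk; simp at hk
  | cons c rest ih =>
    intro i h k hk
    simp only [pvFirstHit] at h
    cases hm : pvMatchAt (c :: rest) trigs with
    | some tw => rw [hm] at h; simp at h
    | none =>
      rw [hm] at h
      cases k with
      | zero => simpa using hm
      | succ k' =>
        simp only [List.drop_succ_cons]
        exact ih (i+1) h k' (by simpa using hk)

lemma pvFirstHit_some_spec (trigs : List (List Char × List (String × String))) :
    ∀ (suff : List Char) (i j : Nat) (tw : List Char × List (String × String)),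
      pvFirstHit trigs i suff = some (j, tw) →
      i ≤ j ∧ (j - i) < suff.length ∧ pvMatchAt (suff.drop (j - i)) trigs = some tw ∧
        ∀ k < j - i, pvMatchAt (suff.drop k) trigs = none := by
  intro suff
  induction suff with
  | nil => intro i j tw h; simp [pvFirstHit] at h
  | cons c rest ih =>
    intro i j tw h
    simp only [pvFirstHit] at h
    cases hm : pvMatchAt (c :: rest) trigs with
    | some tw' =>
      rw [hm] at h
      obtain ⟨rfl, rfl⟩ : i = j ∧ tw' = tw := by
        simpa [eq_comm, and_comm] using h
      refine ⟨le_refl _, by simp, by simpa using hm, ?_⟩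
      intro k hk; omega
    | none =>
      rw [hm] at h
      obtain ⟨h1, h2, h3, h4⟩ := ih (i+1) j tw h
      refine ⟨by omega, by simp; omega, ?_, ?_⟩
      · have : (c :: rest).drop (j - i) = rest.drop (j - (i+1)) := by
          have : j - i = (j - (i+1)) + 1 := by omega
          simp [this]
        rw [this]; exact h3
      · intro k hk
        cases k with
        | zero => simpa using hm
        | succ k' =>
          simp only [List.drop_succ_cons]
          exact h4 k' (by omega)

-- find = p when the pattern matches at p and nowhere earlier
lemma pvFind_eq (low t : List Char) (p : Nat) (hp : t <+: low.drop p)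
    (hmin : ∀ k < p, ¬ t <+: low.drop k) : PySem.Chars.find low t = (p : Int) := by
  have hinf : t <:+: low := (hp.isInfix).trans (List.drop_suffix p low).isInfix
  have hne : PySem.Chars.find low t ≠ -1 := (PySem.Chars.find_ne_neg_one_iff low t).mpr hinf
  have h0 : 0 ≤ PySem.Chars.find low t := by
    have := PySem.Chars.neg_one_le_find low t; omega
  obtain ⟨hpre, hlt⟩ := PySem.Chars.find_spec h0
  rcases lt_trichotomy (PySem.Chars.find low t).toNat p with h | h | h
  · exact absurd hpre (hmin _ h)
  · omega
  · exact absurd hp (hlt p h)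

-- if the pattern matches nowhere up to p, its find is -1 or beyond p
lemma pvFind_cases (low t : List Char) (p : Nat)
    (hmin : ∀ k ≤ p, ¬ t <+: low.drop k) :
    PySem.Chars.find low t = -1 ∨ (p : Int) < PySem.Chars.find low t := by
  by_cases h0 : 0 ≤ PySem.Chars.find low t
  · right
    obtain ⟨hpre, _⟩ := PySem.Chars.find_spec h0
    by_contra hle
    exact hmin (PySem.Chars.find low t).toNat (by omega) hpre
  · left; have := PySem.Chars.neg_one_le_find low t; omega

lemma pvFoldA_keep (low : List Char) :
    ∀ (trigs : List (List Char × List (String × String))) (b : Int) (o : Option (List (String × String))),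
      (∀ tw ∈ trigs, ¬ (0 ≤ PySem.Chars.find low tw.1 ∧ PySem.Chars.find low tw.1 < b)) →
      pvFoldA low trigs (b, o) = (b, o) := by
  intro trigs
  induction trigs with
  | nil => intro b o _; rfl
  | cons tw rest ih =>
    intro b o h
    simp only [pvFoldA, List.foldl_cons]
    rw [if_neg (h tw List.mem_cons_self)]
    exact ih b o (fun tw' htw' => h tw' (List.mem_cons_of_mem _ htw'))

lemma pvFoldA_of_hit (low : List Char) :
    ∀ (trigs : List (List Char × List (String × String))) (b : Int)
      (o : Option (List (String × String))) (p : Nat) (tw : List Char × List (String × String)),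
      (p : Int) < b →
      pvMatchAt (low.drop p) trigs = some tw →
      (∀ k < p, pvMatchAt (low.drop k) trigs = none) →
      pvFoldA low trigs (b, o) = ((p : Int), some tw.2) := by
  intro trigs
  induction trigs with
  | nil => intro b o p tw _ hm _; simp [pvMatchAt] at hm
  | cons tw' rest ih =>
    intro b o p tw hb hm hnone
    have hnone1 : ∀ k < p, ¬ (tw'.1 <+: low.drop k) := by
      intro k hk
      exact (pvMatchAt_eq_none_iff _ _).mp (hnone k hk) tw' List.mem_cons_self
    have hnone2 : ∀ k < p, pvMatchAt (low.drop k) rest = none := by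
      intro k hk
      rw [pvMatchAt_eq_none_iff]
      intro tw'' htw''
      exact (pvMatchAt_eq_none_iff _ _).mp (hnone k hk) tw'' (List.mem_cons_of_mem _ htw'')
    by_cases hp : tw'.1.isPrefixOf (low.drop p)
    · -- head trigger matches at p: it is the hit, and its find is exactly p
      have htw : tw' = tw := by
        simp only [pvMatchAt, hp, if_pos, Option.some.injEq] at hm
        exact hm
      have hfind : PySem.Chars.find low tw'.1 = (p : Int) :=
        pvFind_eq low tw'.1 p (List.isPrefixOf_iff_prefix.mp hp) hnone1
      simp only [pvFoldA, List.foldl_cons, hfind]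
      rw [if_pos ⟨by omega, hb⟩]
      have : pvFoldA low rest ((p : Int), some tw'.2) = ((p : Int), some tw'.2) := by
        apply pvFoldA_keep
        intro tw'' htw'' ⟨h0, hlt⟩
        obtain ⟨hpre, _⟩ := PySem.Chars.find_spec h0
        have hklt : (PySem.Chars.find low tw''.1).toNat < p := by omega
        have := (pvMatchAt_eq_none_iff _ _).mp (hnone2 _ hklt) tw'' htw''
        exact this hpre
      rw [← htw]
      exact this
    · -- head trigger does not match at p (nor earlier): it cannot improve past p
      have hm' : pvMatchAt (low.drop p) rest = some tw := by
        simpa [pvMatchAt, hp] using hm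
      have hcases : PySem.Chars.find low tw'.1 = -1 ∨ (p : Int) < PySem.Chars.find low tw'.1 := by
        apply pvFind_cases
        intro k hk
        rcases Nat.lt_or_ge k p with h | h
        · exact hnone1 k h
        · have : k = p := by omega
          subst this
          exact fun hpre => hp (List.isPrefixOf_iff_prefix.mpr hpre)
      simp only [pvFoldA, List.foldl_cons]
      by_cases hcond : 0 ≤ PySem.Chars.find low tw'.1 ∧ PySem.Chars.find low tw'.1 < b
      · rw [if_pos hcond]
        exact ih _ _ p tw (by rcases hcases with h | h <;> omega) hm' hnone2
      · rw [if_neg hcond]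
        exact ih _ _ p tw hb hm' hnone2

lemma pvBestA_eq (active : List (List (String × String))) (remaining : List Char) :
    pvBestA active remaining
      = pvFoldA (PySem.Chars.lower remaining)
          (active.map (fun w => (PySem.Chars.lower (pvTrig w).toList, w)))
          ((remaining.length : Int), none) := by
  simp only [pvBestA, pvFoldA, List.foldl_map]

-- the loops agree iteration by iteration
lemma pvLoop_eq (active : List (List (String × String))) :
    ∀ (fuel : Nat) (remaining : List Char),
      pvLoopA active fuel remaining
        = pvLoopB (active.map (fun w => (PySem.Chars.lower (pvTrig w).toList, w))) fuel remaining := by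
  intro fuel
  induction fuel with
  | zero => intro remaining; rfl
  | succ fuel ih =>
    intro remaining
    by_cases hr : remaining = []
    · simp [pvLoopA, pvLoopB, hr]
    · have hlen : (PySem.Chars.lower remaining).length = remaining.length := by
        simp [PySem.Chars.lower]
      simp only [pvLoopA, pvLoopB, if_neg hr, pvBestA_eq]
      cases hhit : pvFirstHit (active.map (fun w => (PySem.Chars.lower (pvTrig w).toList, w))) 0
          (PySem.Chars.lower remaining) with
      | none =>
        have hkeep : pvFoldA (PySem.Chars.lower remaining)
            (active.map (fun w => (PySem.Chars.lower (pvTrig w).toList, w)))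
            ((remaining.length : Int), none) = ((remaining.length : Int), none) := by
          apply pvFoldA_keep
          intro tw htw ⟨h0, hlt⟩
          obtain ⟨hpre, -⟩ := PySem.Chars.find_spec h0
          have hk : (PySem.Chars.find (PySem.Chars.lower remaining) tw.1).toNat
              < (PySem.Chars.lower remaining).length := by omega
          exact (pvMatchAt_eq_none_iff _ _).mp
            (pvFirstHit_none_spec _ _ 0 hhit _ hk) tw htw hpre
        rw [hkeep]
      | some r =>
        obtain ⟨i, tw⟩ := r
        obtain ⟨-, hilt, hmat, hbefore⟩ := pvFirstHit_some_spec _ _ 0 i tw hhit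
        simp only [Nat.sub_zero] at hilt hmat hbefore
        have hfoldv : pvFoldA (PySem.Chars.lower remaining)
            (active.map (fun w => (PySem.Chars.lower (pvTrig w).toList, w)))
            ((remaining.length : Int), none) = ((i : Int), some tw.2) :=
          pvFoldA_of_hit _ _ _ none i tw (by omega) hmat hbefore
        rw [hfoldv]
        have htl : tw.1.length = (pvTrig tw.2).toList.length := by
          have hmem := (pvMatchAt_mem _ _ _ hmat).1
          obtain ⟨w, -, hw⟩ := List.mem_map.mp hmem
          have h1 : tw.1 = PySem.Chars.lower (pvTrig w).toList := by rw [← hw]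
          have h2 : tw.2 = w := by rw [← hw]
          rw [h1, h2, PySem.Chars.lower, List.length_map]
        have hcast : (i : Int) + PySem.Str.len (pvTrig tw.2) = ((i + tw.1.length : Nat) : Int) := by
          rw [PySem.Str.len, htl]; push_cast; ring
        simp only [hcast, ih]

-- ===== VERDICT (by name: the statement is the Claim_ definition above) =====
theorem split_by_triggers_spec : Claim_equal_split_by_triggers := by
  intro text workflows _
  unfold Spec_split_by_triggers split_by_triggers split_by_triggers_alt
  by_cases h : workflows = []
  · simp [h]
  · simp only [if_neg h]
    exact pvLoop_eq (pvActive workflows) (text.toList.length + 1) text.toList
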